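-- pv_equiv track=rewrite | github.com/ttjjlw/NLP | module/sf/mid/bpe.py | get_new_smallest_w
-- ===== SOURCE A (Python) =====
-- def get_new_smallest_w(smallest_w,highest_co):
--     new_smallest_w=[]
--     i=0
--     while 1:
--         if i >= len(smallest_w)-1:
--             if i ==len(smallest_w)-1:
--                 new_smallest_w.append(smallest_w[i])
--             break
--         if smallest_w[i]+smallest_w[i+1]==highest_co:
--             new_smallest_w.append(highest_co)
--             i+=2
--         else:
--             new_smallest_w.append(smallest_w[i])
--             i+=1
--     return new_smallest_w
-- ===== SOURCE B (Python) =====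
-- def get_new_smallest_w(smallest_w, highest_co):
--     n = len(smallest_w)
--     marks = [False] * n
--     for i in range(n - 1):
--         if not (i and marks[i - 1]) and smallest_w[i] + smallest_w[i + 1] == highest_co:
--             marks[i] = True
--     return [highest_co if marks[i] else smallest_w[i]
--             for i in range(n) if i == 0 or not marks[i - 1]]
-- ===== Notes on version B (the rewrite author's own statement) =====
-- stated objective: alternative
-- what changed: B replaces A's single fused while loop (append and jump the index by two on a merge) with two staged passes: a first pass fills a boolean marks array with the greedy merge positions, then a comprehension emits the result, substituting highest_co at marked positions and dropping each element that follows a mark.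
import Mathlib
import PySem

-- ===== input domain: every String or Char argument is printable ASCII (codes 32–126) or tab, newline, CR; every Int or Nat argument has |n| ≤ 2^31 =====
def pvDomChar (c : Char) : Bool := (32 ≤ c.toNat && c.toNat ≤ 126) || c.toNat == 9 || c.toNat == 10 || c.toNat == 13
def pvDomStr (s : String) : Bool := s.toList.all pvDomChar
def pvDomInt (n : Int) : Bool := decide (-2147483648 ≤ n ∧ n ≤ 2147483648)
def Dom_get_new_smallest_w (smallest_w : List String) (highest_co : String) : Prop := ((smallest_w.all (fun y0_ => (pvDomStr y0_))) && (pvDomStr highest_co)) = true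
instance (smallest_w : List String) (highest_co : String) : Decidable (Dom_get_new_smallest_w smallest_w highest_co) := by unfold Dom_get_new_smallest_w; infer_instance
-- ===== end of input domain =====

-- B replaces A's fused index-jumping while loop by two staged passes: a marks array of
-- greedy merge positions, then a filtered comprehension emitting the result (alternative decomposition).

-- ===== PORT A =====
-- A's while loop over index i, transcribed as recursion on i (the loop state);
-- in-range reads smallest_w[i] are taken with getD (always in range where used).
def get_new_smallest_w_go (smallest_w : List String) (highest_co : String) (i : Nat) : List String :=
  if (i : Int) ≥ (smallest_w.length : Int) - 1 then
    (if (i : Int) = (smallest_w.length : Int) - 1 then [smallest_w.getD i ""] else [])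
  else if smallest_w.getD i "" ++ smallest_w.getD (i+1) "" = highest_co then
    highest_co :: get_new_smallest_w_go smallest_w highest_co (i+2)
  else
    smallest_w.getD i "" :: get_new_smallest_w_go smallest_w highest_co (i+1)
termination_by smallest_w.length - i
decreasing_by all_goals omega

def get_new_smallest_w (smallest_w : List String) (highest_co : String) : List String :=
  get_new_smallest_w_go smallest_w highest_co 0

-- ===== PORT B =====
-- Source B: pass 1 fills `marks` over range(n-1) (marks[i]=True on a greedy merge position,
-- `not (i and marks[i-1])` ported with the same short-circuit); pass 2 is the comprehension
-- over range(n) filtering out indices that follow a mark. All reads are in range where evaluated.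
def get_new_smallest_w_alt (smallest_w : List String) (highest_co : String) : List String :=
  let n := smallest_w.length
  let marks := (List.range (n - 1)).foldl
    (fun m i =>
      if (!(decide (i ≠ 0) && m.getD (i - 1) false))
           && (smallest_w.getD i "" ++ smallest_w.getD (i + 1) "" == highest_co)
      then m.set i true else m)
    (List.replicate n false)
  ((List.range n).filter (fun i => i == 0 || !marks.getD (i - 1) false)).map
    (fun i => if marks.getD i false then highest_co else smallest_w.getD i "")

-- ===== PRECONDITION & SPEC =====
def Spec_get_new_smallest_w (smallest_w : List String) (highest_co : String) (out : List String) : Prop := out = get_new_smallest_w_alt smallest_w highest_co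
instance (smallest_w : List String) (highest_co : String) (out : List String) : Decidable (Spec_get_new_smallest_w smallest_w highest_co out) := by unfold Spec_get_new_smallest_w; infer_instance

-- ===== CLAIM =====
def Claim_equal_get_new_smallest_w : Prop := ∀ (smallest_w : List String) (highest_co : String), Dom_get_new_smallest_w smallest_w highest_co → Spec_get_new_smallest_w smallest_w highest_co (get_new_smallest_w smallest_w highest_co)

-- ===== LEMMAS AND PROOFS =====

-- pattern-match characterisation both ports are reduced to
def mergeSkel (h : String) : List String → List String
  | [] => []
  | [x] => [x]
  | x :: y :: r => if x ++ y = h then h :: mergeSkel h r else x :: mergeSkel h (y :: r)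

-- pointwise description of the marks array
def markF (xs : List String) (h : String) : Nat → Bool
  | 0 => decide (1 < xs.length) && (xs.getD 0 "" ++ xs.getD 1 "" == h)
  | i+1 => decide (i+1+1 < xs.length) && !markF xs h i
             && (xs.getD (i+1) "" ++ xs.getD (i+1+1) "" == h)

def markStep (xs : List String) (h : String) (m : List Bool) (i : Nat) : List Bool :=
  if (!(decide (i ≠ 0) && m.getD (i - 1) false))
       && (xs.getD i "" ++ xs.getD (i + 1) "" == h)
  then m.set i true else m

theorem markF_of_ge (xs : List String) (h : String) (j : Nat) (hj : xs.length ≤ j + 1) :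
    markF xs h j = false := by
  cases j with
  | zero => simp [markF]; omega
  | succ i => simp [markF]; intro hlt; omega

theorem marks_invariant (xs : List String) (h : String) :
    ∀ k, k ≤ xs.length - 1 →
      (((List.range k).foldl (markStep xs h) (List.replicate xs.length false)).length = xs.length) ∧
      (∀ j, ((List.range k).foldl (markStep xs h) (List.replicate xs.length false)).getD j false
          = if j < k then markF xs h j else false) := by
  intro k
  induction k with
  | zero =>
    intro _
    simp only [List.range_zero, List.foldl_nil]
    refine ⟨by simp, ?_⟩
    intro j
    rw [if_neg (by omega), List.getD_eq_getElem?_getD, List.getElem?_replicate]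
    split <;> rfl
  | succ k ih =>
    intro hk
    obtain ⟨hlen, hget⟩ := ih (by omega)
    have hkn : k + 1 < xs.length := by omega
    rw [List.range_succ, List.foldl_append]
    set r := (List.range k).foldl (markStep xs h) (List.replicate xs.length false) with hr
    -- the condition computed at step k equals markF k
    have hcond : ((!(decide (k ≠ 0) && r.getD (k - 1) false))
        && (xs.getD k "" ++ xs.getD (k + 1) "" == h)) = markF xs h k := by
      cases k with
      | zero => simp [markF]; intro _; omega
      | succ i =>
        have h2 := hget i
        rw [if_pos (by omega)] at h2
        simp only [markF]
        rw [show (i + 1 - 1 : Nat) = i from rfl, h2]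
        simp [hkn]
    have hsetlen : ∀ b, (r.set k b).length = xs.length := by intro b; simp [hlen]
    constructor
    · simp only [List.foldl_cons, List.foldl_nil, markStep]
      split <;> simp [hlen]
    · intro j
      simp only [List.foldl_cons, List.foldl_nil, markStep, hcond]
      by_cases hm : markF xs h k = true
      · rw [if_pos hm]
        by_cases hjk : j = k
        · subst hjk
          rw [List.getD_eq_getElem?_getD, List.getElem?_set_self (by omega)]
          simp [hm]
        · rw [List.getD_eq_getElem?_getD, List.getElem?_set_ne (by omega),
              ← List.getD_eq_getElem?_getD, hget j]
          by_cases hj : j < k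
          · rw [if_pos hj, if_pos (by omega)]
          · rw [if_neg hj, if_neg (by omega)]
      · rw [if_neg hm, hget j]
        by_cases hjk : j = k
        · subst hjk
          rw [if_neg (by omega), if_pos (by omega)]
          simp at hm; simp [hm]
        · by_cases hj : j < k
          · rw [if_pos hj, if_pos (by omega)]
          · rw [if_neg hj, if_neg (by omega)]

theorem marks_getD (xs : List String) (h : String) (j : Nat) :
    ((List.range (xs.length - 1)).foldl (markStep xs h) (List.replicate xs.length false)).getD j false
      = markF xs h j := by
  obtain ⟨_, hget⟩ := marks_invariant xs h (xs.length - 1) (le_refl _)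
  rw [hget j]
  by_cases hj : j < xs.length - 1
  · simp [hj]
  · rw [if_neg hj, markF_of_ge xs h j (by omega)]

-- markF k = true forces the pair at k to merge
theorem markF_true_pair (xs : List String) (h : String) (k : Nat) (hm : markF xs h k = true) :
    k + 1 < xs.length ∧ xs.getD k "" ++ xs.getD (k+1) "" = h := by
  cases k with
  | zero =>
    simp only [markF, Bool.and_eq_true, decide_eq_true_eq, beq_iff_eq] at hm
    exact ⟨hm.1, hm.2⟩
  | succ i =>
    simp only [markF, Bool.and_eq_true, decide_eq_true_eq, beq_iff_eq,
      Bool.not_eq_true'] at hm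
    exact ⟨hm.1.1, hm.2⟩

-- under the "previous index not marked" guard, markF k = false forces the pair not to merge (when in range)
theorem markF_false_pair (xs : List String) (h : String) (k : Nat)
    (hk : k + 1 < xs.length) (hprev : k = 0 ∨ markF xs h (k - 1) = false)
    (hm : markF xs h k = false) : xs.getD k "" ++ xs.getD (k+1) "" ≠ h := by
  intro hpair
  cases k with
  | zero =>
    have ht : markF xs h 0 = true := by
      simp only [markF, Bool.and_eq_true, decide_eq_true_eq, beq_iff_eq]
      exact ⟨by omega, hpair⟩
    simp [hm] at ht
  | succ i =>
    have hp : markF xs h i = false := by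
      rcases hprev with h0 | hp
      · omega
      · simpa using hp
    have ht : markF xs h (i+1) = true := by
      simp only [markF, Bool.and_eq_true, decide_eq_true_eq, beq_iff_eq,
        Bool.not_eq_true']
      exact ⟨⟨by omega, hp⟩, hpair⟩
    simp [hm] at ht

theorem emit_eq_skel (xs : List String) (h : String) :
    ∀ m i, i + m = xs.length → (i = 0 ∨ markF xs h (i - 1) = false) →
      (((List.range' i m).filter (fun j => j == 0 || !markF xs h (j - 1))).map
        (fun j => if markF xs h j then h else xs.getD j "")) = mergeSkel h (xs.drop i) := by
  intro m
  induction m using Nat.strong_induction_on with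
  | _ m ih =>
    intro i him hkeep
    cases m with
    | zero =>
      have : xs.drop i = [] := List.drop_eq_nil_of_le (by omega)
      simp [this, mergeSkel]
    | succ mm =>
      have hi : i < xs.length := by omega
      have hkeepb : (i == 0 || !markF xs h (i - 1)) = true := by
        rcases hkeep with h0 | hp
        · simp [h0]
        · simp [hp]
      rw [List.range'_succ, List.filter_cons, if_pos hkeepb, List.map_cons]
      have hgi : xs.getD i "" = xs[i] := by
        simp [List.getD_eq_getElem?_getD, List.getElem?_eq_getElem hi]
      by_cases hm : markF xs h i = true
      · -- merge at i: index i+1 is filtered out, recurse at i+2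
        obtain ⟨hi1, hpair⟩ := markF_true_pair xs h i hm
        have hmm : 1 ≤ mm := by omega
        have hd : xs.drop i = xs[i] :: xs[i+1] :: xs.drop (i+2) := by
          rw [List.drop_eq_getElem_cons hi, List.drop_eq_getElem_cons hi1]
        have hgi1 : xs.getD (i+1) "" = xs[i+1] := by
          simp [List.getD_eq_getElem?_getD, List.getElem?_eq_getElem hi1]
        have hnext : markF xs h (i+1) = false := by
          simp [markF, hm]
        obtain ⟨mm', hmm'⟩ : ∃ mm', mm = mm' + 1 := ⟨mm - 1, by omega⟩
        subst hmm'
        have hnotkeep : ¬(((i+1 : Nat) == 0 || !markF xs h ((i+1) - 1)) = true) := by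
          simp [hm]
        have hstep : List.filter (fun j => j == 0 || !markF xs h (j - 1)) (List.range' (i+1) (mm'+1))
            = List.filter (fun j => j == 0 || !markF xs h (j - 1)) (List.range' (i+2) mm') := by
          rw [List.range'_succ, List.filter_cons, if_neg hnotkeep]
        rw [hstep, ih mm' (by omega) (i+2) (by omega) (Or.inr (by simpa using hnext))]
        have hskel : mergeSkel h (xs.drop i) = h :: mergeSkel h (xs.drop (i+2)) := by
          rw [hd]
          simp only [mergeSkel]
          rw [if_pos (by rw [hgi, hgi1] at hpair; exact hpair)]
        rw [hskel]
        simp [hm]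
      · -- no merge at i
        simp only [Bool.not_eq_true] at hm
        by_cases hi1 : i + 1 < xs.length
        · have hpair : xs.getD i "" ++ xs.getD (i+1) "" ≠ h :=
            markF_false_pair xs h i hi1 hkeep hm
          have hgi1 : xs.getD (i+1) "" = xs[i+1] := by
            simp [List.getD_eq_getElem?_getD, List.getElem?_eq_getElem hi1]
          have hd : xs.drop i = xs[i] :: xs[i+1] :: xs.drop (i+2) := by
            rw [List.drop_eq_getElem_cons hi, List.drop_eq_getElem_cons hi1]
          rw [ih mm (by omega) (i+1) (by omega) (Or.inr (by simpa using hm))]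
          have hskel : mergeSkel h (xs.drop i) = xs[i] :: mergeSkel h (xs.drop (i+1)) := by
            rw [hd, List.drop_eq_getElem_cons hi1]
            simp only [mergeSkel]
            rw [if_neg (by rw [hgi, hgi1] at hpair; exact hpair)]
          rw [hskel]
          simp [hm, List.getElem?_eq_getElem hi]
        · -- i is the last index: mm = 0
          have hmm0 : mm = 0 := by omega
          subst hmm0
          have hd : xs.drop i = [xs[i]] := by
            rw [List.drop_eq_getElem_cons hi]
            have : xs.drop (i+1) = [] := List.drop_eq_nil_of_le (by omega)
            simp [this]
          simp [hd, mergeSkel, hm, List.getElem?_eq_getElem hi]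

theorem alt_eq_skel (xs : List String) (h : String) :
    get_new_smallest_w_alt xs h = mergeSkel h xs := by
  unfold get_new_smallest_w_alt
  simp only []
  have hfun : (fun i => i == 0 ||
      !((List.range (xs.length - 1)).foldl (markStep xs h) (List.replicate xs.length false)).getD (i - 1) false)
      = (fun i => i == 0 || !markF xs h (i - 1)) := by
    funext i; rw [marks_getD]
  have hfun2 : (fun i => if ((List.range (xs.length - 1)).foldl (markStep xs h) (List.replicate xs.length false)).getD i false then h else xs.getD i "")
      = (fun i => if markF xs h i then h else xs.getD i "") := by
    funext i; rw [marks_getD]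
  show (((List.range xs.length).filter _).map _) = _
  rw [show (fun m i => if (!(decide (i ≠ 0) && m.getD (i - 1) false))
        && (xs.getD i "" ++ xs.getD (i + 1) "" == h) then m.set i true else m) = markStep xs h from rfl]
  rw [hfun, hfun2, List.range_eq_range']
  have := emit_eq_skel xs h xs.length 0 (by omega) (Or.inl rfl)
  simpa using this

theorem go_eq_skel (xs : List String) (h : String) :
    ∀ i : Nat, get_new_smallest_w_go xs h i = mergeSkel h (xs.drop i) := by
  intro i
  induction hn : xs.length - i using Nat.strong_induction_on generalizing i with
  | _ n ih =>
    rw [get_new_smallest_w_go]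
    by_cases hge : (i : Int) ≥ (xs.length : Int) - 1
    · rw [if_pos hge]
      by_cases heq : (i : Int) = (xs.length : Int) - 1
      · rw [if_pos heq]
        have hlt : i < xs.length := by omega
        have : xs.drop i = [xs[i]] := by
          have := List.drop_eq_getElem_cons hlt
          rw [this]
          have : xs.drop (i+1) = [] := List.drop_eq_nil_of_le (by omega)
          simp [this]
        rw [this]
        simp [mergeSkel, List.getD_eq_getElem?_getD, List.getElem?_eq_getElem hlt]
      · rw [if_neg heq]
        have : xs.drop i = [] := List.drop_eq_nil_of_le (by omega)
        rw [this]; simp [mergeSkel]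
    · rw [if_neg hge]
      have hi1 : i + 1 < xs.length := by omega
      have hi : i < xs.length := by omega
      have hd : xs.drop i = xs[i] :: xs[i+1] :: xs.drop (i+2) := by
        rw [List.drop_eq_getElem_cons hi, List.drop_eq_getElem_cons hi1]
      have hgi : xs.getD i "" = xs[i] := by
        simp [List.getD_eq_getElem?_getD, List.getElem?_eq_getElem hi]
      have hgi1 : xs.getD (i+1) "" = xs[i+1] := by
        simp [List.getD_eq_getElem?_getD, List.getElem?_eq_getElem hi1]
      rw [hd, hgi, hgi1]
      by_cases hx : xs[i] ++ xs[i+1] = h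
      · rw [if_pos hx]
        simp only [mergeSkel, if_pos hx]
        rw [ih (xs.length - (i+2)) (by omega) (i+2) rfl]
      · rw [if_neg hx]
        simp only [mergeSkel, if_neg hx]
        rw [ih (xs.length - (i+1)) (by omega) (i+1) rfl,
            List.drop_eq_getElem_cons hi1]

-- ===== VERDICT =====
theorem get_new_smallest_w_spec : Claim_equal_get_new_smallest_w := by
  intro xs h _
  unfold Spec_get_new_smallest_w get_new_smallest_w
  rw [alt_eq_skel, go_eq_skel]
  simp
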